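-- pv_equiv track=rewrite | github.com/ErosSph/Arcane1 | sva_merge_ez_pre_api.py | _is_cartesian_product_contiguous
-- ===== SOURCE A (Python) =====
-- from typing import List, Tuple, Dict, Optional, Set
--
-- def _is_cartesian_product_contiguous(k_vectors:List[Tuple[int,...]])->Optional[List[Tuple[int,int]]]:
--     if not k_vectors: return None
--     m=len(k_vectors[0])
--     for kv in k_vectors:
--         if len(kv)!=m: return None
--     per_dim=[]
--     for d in range(m):
--         vals=sorted({kv[d] for kv in k_vectors})
--         ok=all(vals[i]+1==vals[i+1] for i in range(len(vals)-1))
--         if not ok: return None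
--         per_dim.append((vals[0], vals[-1]))
--     prod=1
--     for lo,hi in per_dim: prod *= (hi-lo+1)
--     if prod != len(set(k_vectors)): return None
--     return per_dim
-- ===== SOURCE B (Python) =====
-- def _is_cartesian_product_contiguous(k_vectors):
--     # Counting argument: the vectors form a contiguous cartesian box iff the number
--     # of DISTINCT vectors equals the product of the per-dimension spans (max-min+1):
--     # distinct count <= prod of per-dim distinct counts <= prod of spans, and
--     # equality forces every dimension's values to fill its whole [min, max] range.
--     # So we never build per-dimension value sets or check contiguity explicitly.
--     if not k_vectors:
--         return None
--     m = len(k_vectors[0])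
--     bounds = [(v, v) for v in k_vectors[0]]
--     for kv in k_vectors[1:]:
--         if len(kv) != m:
--             return None
--         bounds = [(min(lo, v), max(hi, v)) for (lo, hi), v in zip(bounds, kv)]
--     prod = 1
--     for lo, hi in bounds:
--         prod *= hi - lo + 1
--     return bounds if prod == len(set(k_vectors)) else None
-- ===== Notes on version B (the rewrite author's own statement) =====
-- stated objective: alternative
-- what changed: B drops A's per-dimension value sets, sorting and explicit contiguity checks entirely: it tracks only per-dimension (min,max) pairs in a single zip-fold over the vectors and decides by the counting identity that the vectors form a contiguous box iff the number of distinct vectors equals the product of the spans (distinct count <= product of per-dim distinct counts <= product of spans, equality forcing contiguity).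
import Mathlib
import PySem

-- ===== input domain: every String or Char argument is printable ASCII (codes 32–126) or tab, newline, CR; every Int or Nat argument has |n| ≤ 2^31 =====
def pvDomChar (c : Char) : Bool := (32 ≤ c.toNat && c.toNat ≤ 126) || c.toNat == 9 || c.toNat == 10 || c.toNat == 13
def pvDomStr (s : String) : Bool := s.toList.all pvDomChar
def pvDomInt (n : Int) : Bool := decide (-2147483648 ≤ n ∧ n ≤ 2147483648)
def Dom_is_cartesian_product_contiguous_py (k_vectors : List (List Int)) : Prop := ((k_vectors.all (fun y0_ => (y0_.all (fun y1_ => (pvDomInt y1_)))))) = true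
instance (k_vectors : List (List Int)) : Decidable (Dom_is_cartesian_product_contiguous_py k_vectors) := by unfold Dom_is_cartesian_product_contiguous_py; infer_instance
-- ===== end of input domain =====

-- B replaces A's per-dimension sorted value sets and explicit contiguity checks by a single
-- zip-fold keeping only per-dimension (min,max) and the counting test
-- |distinct vectors| = product of spans (objective: alternative).

-- ===== PORT A =====
-- 'for d in range(m): vals = sorted({kv[d] for kv in k_vectors}); ok = all(...); if not ok: return None; per_dim.append(...)'
def pvA_dimLoop (k_vectors : List (List Int)) : List Int → List (Int × Int) → Option (List (Int × Int))
  | [], per_dim => some per_dim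
  | d :: ds, per_dim =>
      let vals := PySem.List.sorted (PySem.Set.ofList (k_vectors.map (fun kv => PySem.List.pyGetD kv d 0))) (fun x => x) false
      let ok := (PySem.List.pyRange 0 ((vals.length : Int) - 1) 1).all
                  (fun i => PySem.List.pyGetD vals i 0 + 1 == PySem.List.pyGetD vals (i + 1) 0)
      if ok then
        pvA_dimLoop k_vectors ds (per_dim ++ [(PySem.List.pyGetD vals 0 0, PySem.List.pyGetD vals (-1) 0)])
      else none

def is_cartesian_product_contiguous_py (k_vectors : List (List Int)) : Option (List (Int × Int)) :=
  match k_vectors with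
  | [] => none                                     -- if not k_vectors: return None
  | kv0 :: _ =>
    let m := kv0.length
    if k_vectors.any (fun kv => kv.length ≠ m) then none     -- for kv: if len(kv)!=m: return None
    else
      match pvA_dimLoop k_vectors (PySem.List.pyRange 0 (m : Int) 1) [] with
      | none => none
      | some per_dim =>
        let prod := per_dim.foldl (fun acc p => acc * (p.2 - p.1 + 1)) 1
        if prod ≠ ((PySem.Set.ofList k_vectors).length : Int) then none
        else some per_dim

-- ===== PORT B =====
-- 'for kv in k_vectors[1:]: if len(kv)!=m: return None; bounds=[(min(lo,v),max(hi,v)) for (lo,hi),v in zip(bounds,kv)]'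
def pvB_loop (m : Nat) : List (List Int) → List (Int × Int) → Option (List (Int × Int))
  | [], bounds => some bounds
  | kv :: rest, bounds =>
      if kv.length ≠ m then none
      else pvB_loop m rest (List.zipWith (fun p v => (min p.1 v, max p.2 v)) bounds kv)

def is_cartesian_product_contiguous_py_alt (k_vectors : List (List Int)) : Option (List (Int × Int)) :=
  match k_vectors with
  | [] => none
  | kv0 :: rest =>
    match pvB_loop kv0.length rest (kv0.map (fun v => (v, v))) with
    | none => none
    | some bounds =>
      let prod := bounds.foldl (fun acc p => acc * (p.2 - p.1 + 1)) 1     -- 'for lo,hi in bounds: prod *= hi-lo+1'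
      if prod = ((PySem.Set.ofList (kv0 :: rest)).length : Int) then some bounds else none

-- ===== PRECONDITION & SPEC =====
def Spec_is_cartesian_product_contiguous_py (k_vectors : List (List Int)) (out : Option (List (Int × Int))) : Prop := out = is_cartesian_product_contiguous_py_alt k_vectors
instance (k_vectors : List (List Int)) (out : Option (List (Int × Int))) : Decidable (Spec_is_cartesian_product_contiguous_py k_vectors out) := by unfold Spec_is_cartesian_product_contiguous_py; infer_instance

-- ===== CLAIM (what is proved, stated in full; the proofs are below) =====
def Claim_equal_is_cartesian_product_contiguous_py : Prop := ∀ (k_vectors : List (List Int)), Dom_is_cartesian_product_contiguous_py k_vectors → Spec_is_cartesian_product_contiguous_py k_vectors (is_cartesian_product_contiguous_py k_vectors)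

-- ===== LEMMAS AND PROOFS =====

-- proof-side view of A's dimension loop: recursion over the list of columns
def pvA_cols : List (List Int) → List (Int × Int) → Option (List (Int × Int))
  | [], per_dim => some per_dim
  | col :: cols, per_dim =>
      let vals := PySem.List.sorted (PySem.Set.ofList col) (fun x => x) false
      let ok := (PySem.List.pyRange 0 ((vals.length : Int) - 1) 1).all
                  (fun i => PySem.List.pyGetD vals i 0 + 1 == PySem.List.pyGetD vals (i + 1) 0)
      if ok then
        pvA_cols cols (per_dim ++ [(PySem.List.pyGetD vals 0 0, PySem.List.pyGetD vals (-1) 0)])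
      else none

-- A's ok-boolean for one column, named
def pvOkCol (col : List Int) : Bool :=
  let vals := PySem.List.sorted (PySem.Set.ofList col) (fun x => x) false
  (PySem.List.pyRange 0 ((vals.length : Int) - 1) 1).all
    (fun i => PySem.List.pyGetD vals i 0 + 1 == PySem.List.pyGetD vals (i + 1) 0)

theorem pvA_dimLoop_eq_cols (kvs : List (List Int)) (ds : List Int) (acc : List (Int × Int)) :
    pvA_dimLoop kvs ds acc = pvA_cols (ds.map (fun d => kvs.map (fun kv => PySem.List.pyGetD kv d 0))) acc := by
  induction ds generalizing acc with
  | nil => rfl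
  | cons d ds ih =>
      simp only [pvA_dimLoop, pvA_cols, List.map_cons]
      split
      · exact ih _
      · rfl

theorem pvA_cols_acc (cols : List (List Int)) (acc : List (Int × Int)) :
    pvA_cols cols acc = (pvA_cols cols []).map (fun per => acc ++ per) := by
  induction cols generalizing acc with
  | nil => simp [pvA_cols]
  | cons c cs ih =>
      simp only [pvA_cols]
      split
      · rw [ih (acc ++ _), ih ([] ++ _)]
        cases pvA_cols cs [] <;> simp
      · rfl

-- A's column loop succeeds, returning head/last of each sorted column-set, iff every column is ok
theorem pvA_cols_some (cols : List (List Int)) (h : ∀ c ∈ cols, pvOkCol c = true) :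
    pvA_cols cols [] = some (cols.map (fun c =>
      (PySem.List.pyGetD (PySem.List.sorted (PySem.Set.ofList c) (fun x => x) false) 0 0,
       PySem.List.pyGetD (PySem.List.sorted (PySem.Set.ofList c) (fun x => x) false) (-1) 0))) := by
  induction cols with
  | nil => rfl
  | cons c cs ih =>
      have hc : pvOkCol c = true := h c (List.mem_cons_self ..)
      unfold pvOkCol at hc
      simp only [pvA_cols]
      rw [if_pos hc]
      rw [pvA_cols_acc, ih (fun x hx => h x (List.mem_cons.mpr (Or.inr hx)))]
      simp

theorem pvA_cols_none (cols : List (List Int)) (h : ∃ c ∈ cols, pvOkCol c = false) :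
    pvA_cols cols [] = none := by
  induction cols with
  | nil => simp at h
  | cons c cs ih =>
      simp only [pvA_cols]
      by_cases hc : pvOkCol c = true
      · unfold pvOkCol at hc
        rw [if_pos hc, pvA_cols_acc]
        obtain ⟨x, hx, hbad⟩ := h
        rcases List.mem_cons.mp hx with rfl | hx'
        · unfold pvOkCol at hbad; rw [hc] at hbad; cases hbad
        · rw [ih ⟨x, hx', hbad⟩]; rfl
      · unfold pvOkCol at hc
        rw [if_neg hc]

-- strictly increasing integer list: last ≥ head + (length - 1)
theorem pvLast_lb : ∀ (t : List Int) (a : Int), (a :: t).Pairwise (· < ·) →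
    a + t.length ≤ (a :: t).getLast (by simp) := by
  intro t
  induction t with
  | nil => intro a _; simp
  | cons y t ih =>
      intro a hp
      have h1 : a < y := (List.pairwise_cons.mp hp).1 y (List.mem_cons_self ..)
      have h2 := (List.pairwise_cons.mp hp).2
      have h3 := ih y h2
      have h4 : (a :: y :: t).getLast (by simp) = (y :: t).getLast (by simp) := by
        simp [List.getLast_cons]
      rw [h4]
      simp only [List.length_cons] at *
      push_cast at *
      omega

-- in a Pairwise-(≤) list, every member is ≤ the last element
theorem pvLe_getLast : ∀ (l : List Int) (h : l ≠ []), l.Pairwise (· ≤ ·) →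
    ∀ y ∈ l, y ≤ l.getLast h := by
  intro l
  induction l with
  | nil => intro h; simp at h
  | cons a t ih =>
      intro h hp y hy
      cases t with
      | nil => simp at hy; simp [hy]
      | cons b t' =>
        have h4 : (a :: b :: t').getLast (by simp) = (b :: t').getLast (by simp) := by
          simp [List.getLast_cons]
        rw [h4]
        rcases List.mem_cons.mp hy with rfl | hy'
        · exact le_trans ((List.pairwise_cons.mp hp).1 b (List.mem_cons_self ..))
            (ih (by simp) (List.pairwise_cons.mp hp).2 b (List.mem_cons_self ..))
        · exact ih (by simp) (List.pairwise_cons.mp hp).2 y hy'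

-- core: consecutive steps of 1 ⟺ length = last - head + 1, for strictly increasing lists
theorem pvChain_iff : ∀ (t : List Int) (a : Int), (a :: t).Pairwise (· < ·) →
    (((∀ j : Nat, j + 1 < (a :: t).length → (a :: t).getD j 0 + 1 = (a :: t).getD (j + 1) 0)) ↔
      ((a :: t).length : Int) = (a :: t).getLast (by simp) - a + 1) := by
  intro t
  induction t with
  | nil =>
      intro a _
      constructor
      · intro _; simp
      · intro _ j hj; simp at hj
  | cons y t ih =>
      intro a hp
      have h1 : a < y := (List.pairwise_cons.mp hp).1 y (List.mem_cons_self ..)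
      have h2 : (y :: t).Pairwise (· < ·) := (List.pairwise_cons.mp hp).2
      have hlast : (a :: y :: t).getLast (by simp) = (y :: t).getLast (by simp) := by
        simp [List.getLast_cons]
      have hsplit : (∀ j : Nat, j + 1 < (a :: y :: t).length →
            (a :: y :: t).getD j 0 + 1 = (a :: y :: t).getD (j + 1) 0) ↔
          (a + 1 = y ∧ ∀ j : Nat, j + 1 < (y :: t).length →
            (y :: t).getD j 0 + 1 = (y :: t).getD (j + 1) 0) := by
        constructor
        · intro h
          refine ⟨h 0 (by simp), fun j hj => ?_⟩
          have := h (j + 1) (by simpa using Nat.succ_lt_succ hj)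
          simpa using this
        · rintro ⟨h0, h⟩ j hj
          cases j with
          | zero => simpa using h0
          | succ j => simpa using h j (by simpa using Nat.lt_of_succ_lt_succ hj)
      have hlb := pvLast_lb t y h2
      rw [hsplit, ih y h2, hlast]
      constructor
      · rintro ⟨h0, hlen⟩
        simp only [List.length_cons] at *
        push_cast at *
        omega
      · intro hlen
        simp only [List.length_cons] at *
        push_cast at *
        omega

-- A's Bool all-check over pyRange ⟺ the ∀-form
theorem pvOk_iff (vals : List Int) :
    ((PySem.List.pyRange 0 ((vals.length : Int) - 1) 1).all
        (fun i => PySem.List.pyGetD vals i 0 + 1 == PySem.List.pyGetD vals (i + 1) 0) = true) ↔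
      (∀ j : Nat, j + 1 < vals.length → vals.getD j 0 + 1 = vals.getD (j + 1) 0) := by
  rw [List.all_eq_true]
  constructor
  · intro h j hj
    have hmem : (j : Int) ∈ PySem.List.pyRange 0 ((vals.length : Int) - 1) 1 := by
      rw [PySem.List.mem_pyRange_one]
      constructor
      · positivity
      · omega
    have := h _ hmem
    rw [beq_iff_eq] at this
    have hcast : (j : Int) + 1 = ((j + 1 : Nat) : Int) := by push_cast; ring
    rw [hcast, PySem.List.pyGetD_natCast, PySem.List.pyGetD_natCast] at this
    exact this
  · intro h i hi
    rw [PySem.List.mem_pyRange_one] at hi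
    obtain ⟨hi0, hi1⟩ := hi
    rw [beq_iff_eq]
    have hj : i = ((i.toNat : Nat) : Int) := by omega
    rw [hj]
    have hcast : ((i.toNat : Nat) : Int) + 1 = ((i.toNat + 1 : Nat) : Int) := by push_cast; ring
    rw [hcast, PySem.List.pyGetD_natCast, PySem.List.pyGetD_natCast]
    exact h i.toNat (by omega)

-- sorted(set(col)) of a nonempty column starts at the running min and ends at the running max
theorem pvSortedHeadLast (x : Int) (cl : List Int) :
    ∃ t, PySem.List.sorted (PySem.Set.ofList (x :: cl)) (fun y => y) false = (cl.foldl min x) :: t ∧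
      ((cl.foldl min x :: t).getLast (by simp)) = cl.foldl max x := by
  have hxs : x ∈ PySem.Set.ofList (x :: cl) := (PySem.Set.mem_ofList _ _).mpr (List.mem_cons_self ..)
  have hvne : PySem.List.sorted (PySem.Set.ofList (x :: cl)) (fun y => y) false ≠ [] := by
    rw [Ne, PySem.List.sorted_eq_nil_iff]
    exact fun h => by simp [h] at hxs
  obtain ⟨v, t, hvt⟩ : ∃ v t, PySem.List.sorted (PySem.Set.ofList (x :: cl)) (fun y => y) false = v :: t := by
    cases h : PySem.List.sorted (PySem.Set.ofList (x :: cl)) (fun y => y) false with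
    | nil => exact absurd h hvne
    | cons v t => exact ⟨v, t, rfl⟩
  have hmemc : ∀ y, y ∈ PySem.Set.ofList (x :: cl) ↔ y ∈ x :: cl :=
    fun y => PySem.Set.mem_ofList _ _
  -- head = running min
  have hlo1 := PySem.List.foldl_min_le cl x
  have hlomem : cl.foldl min x ∈ x :: cl := by
    rcases PySem.List.foldl_min_mem cl x with h | h
    · rw [h]; exact List.mem_cons_self ..
    · exact List.mem_cons.mpr (Or.inr h)
  have hloleall : ∀ y ∈ x :: cl, cl.foldl min x ≤ y := by
    intro y hy
    rcases List.mem_cons.mp hy with rfl | hy'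
    · exact hlo1.1
    · exact hlo1.2 y hy'
  have hvmem : v ∈ x :: cl := by
    have : v ∈ PySem.List.sorted (PySem.Set.ofList (x :: cl)) (fun y => y) false := by
      rw [hvt]; exact List.mem_cons_self ..
    exact (hmemc v).mp ((PySem.List.mem_sorted _ _ _ _).mp this)
  have hhead : ∀ y ∈ x :: cl, v ≤ y := by
    intro y hy
    exact PySem.List.key_head_sorted_le _ (fun z => z) hvt y ((hmemc y).mpr hy)
  have hveq : v = cl.foldl min x :=
    le_antisymm (hhead _ hlomem) (hloleall v hvmem)
  -- last = running max
  have hhi1 := PySem.List.le_foldl_max cl x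
  have hhimem : cl.foldl max x ∈ x :: cl := by
    rcases PySem.List.foldl_max_mem cl x with h | h
    · rw [h]; exact List.mem_cons_self ..
    · exact List.mem_cons.mpr (Or.inr h)
  have hhigeall : ∀ y ∈ x :: cl, y ≤ cl.foldl max x := by
    intro y hy
    rcases List.mem_cons.mp hy with rfl | hy'
    · exact hhi1.1
    · exact hhi1.2 y hy'
  have hpw : (PySem.List.sorted (PySem.Set.ofList (x :: cl)) (fun y => y) false).Pairwise (· ≤ ·) :=
    PySem.List.sorted_pairwise (xs := PySem.Set.ofList (x :: cl)) (key := fun y => y)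
  have hlastle := pvLe_getLast _ hvne hpw
  have hlastmem : (PySem.List.sorted (PySem.Set.ofList (x :: cl)) (fun y => y) false).getLast hvne ∈ x :: cl :=
    (hmemc _).mp ((PySem.List.mem_sorted _ _ _ _).mp (List.getLast_mem hvne))
  have hhiin : cl.foldl max x ∈ PySem.List.sorted (PySem.Set.ofList (x :: cl)) (fun y => y) false :=
    (PySem.List.mem_sorted _ _ _ _).mpr ((hmemc _).mpr hhimem)
  have hgl : (v :: t).getLast (by simp) =
      (PySem.List.sorted (PySem.Set.ofList (x :: cl)) (fun y => y) false).getLast hvne := by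
    congr 1
    exact hvt.symm
  have hlasteq : (v :: t).getLast (by simp) = cl.foldl max x := by
    rw [hgl]
    exact le_antisymm (hhigeall _ hlastmem) (hlastle _ hhiin)
  subst hveq
  exact ⟨t, hvt, hlasteq⟩

-- B's zip-fold of (min,max) pairs, viewed per dimension
theorem pvBounds_eq : ∀ (kvs : List (List Int)) (bounds : List (Int × Int)),
    (∀ kv ∈ kvs, kv.length = bounds.length) →
    kvs.foldl (fun b kv => List.zipWith (fun p v => (min p.1 v, max p.2 v)) b kv) bounds
      = (List.range bounds.length).map
          (fun d => (kvs.map (fun kv => kv.getD d 0)).foldl (fun p v => (min p.1 v, max p.2 v)) (bounds.getD d (0, 0))) := by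
  intro kvs
  induction kvs with
  | nil =>
      intro bounds _
      apply List.ext_getElem
      · simp
      · intro d hd1 hd2
        simp [List.getD_eq_getElem?_getD, List.getElem?_eq_getElem (by simpa using hd2)]
  | cons kv kvs ih =>
      intro bounds hlen
      have hkv : kv.length = bounds.length := hlen kv (List.mem_cons_self ..)
      have hzlen : (List.zipWith (fun p v => (min p.1 v, max p.2 v)) bounds kv).length = bounds.length := by
        simp [hkv]
      simp only [List.foldl_cons]
      rw [ih _ (by intro kv' h'; rw [hzlen]; exact hlen kv' (List.mem_cons.mpr (Or.inr h')))]
      rw [hzlen]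
      apply List.map_congr_left
      intro d hd
      have hdlt : d < bounds.length := by simpa using hd
      simp only [List.map_cons, List.foldl_cons]
      congr 1
      rw [List.getD_eq_getElem?_getD, List.getD_eq_getElem?_getD,
        List.getElem?_eq_getElem (by simpa [hzlen] using hdlt)]
      simp [List.getElem_zipWith, List.getD_eq_getElem?_getD,
        List.getElem?_eq_getElem hdlt, List.getElem?_eq_getElem (by omega : d < kv.length)]

-- a (min,max)-pair fold splits into two scalar folds
theorem pvPairFold (l : List Int) (a b : Int) :
    l.foldl (fun p v => (min p.1 v, max p.2 v)) (a, b) = (l.foldl min a, l.foldl max b) := by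
  induction l generalizing a b with
  | nil => rfl
  | cons y l ih => simp only [List.foldl_cons]; exact ih _ _

-- B's loop as a plain fold when all lengths match, and none otherwise
theorem pvB_loop_ok : ∀ (rest : List (List Int)) (m : Nat) (bounds : List (Int × Int)),
    (∀ kv ∈ rest, kv.length = m) →
    pvB_loop m rest bounds = some (rest.foldl (fun b kv => List.zipWith (fun p v => (min p.1 v, max p.2 v)) b kv) bounds) := by
  intro rest
  induction rest with
  | nil => intro m bounds _; rfl
  | cons kv rest ih =>
      intro m bounds h
      have hkv := h kv (List.mem_cons_self ..)
      simp only [pvB_loop]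
      rw [if_neg (by simp [hkv])]
      simp only [List.foldl_cons]
      exact ih m _ (fun x hx => h x (List.mem_cons.mpr (Or.inr hx)))

theorem pvB_loop_bad : ∀ (rest : List (List Int)) (m : Nat) (bounds : List (Int × Int)),
    (∃ kv ∈ rest, kv.length ≠ m) → pvB_loop m rest bounds = none := by
  intro rest
  induction rest with
  | nil => intro m bounds h; simp at h
  | cons kv rest ih =>
      intro m bounds h
      simp only [pvB_loop]
      by_cases hkv : kv.length = m
      · rw [if_neg (by simp [hkv])]
        apply ih
        obtain ⟨x, hx, hbad⟩ := h
        rcases List.mem_cons.mp hx with rfl | hx'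
        · exact absurd hkv hbad
        · exact ⟨x, hx', hbad⟩
      · simp [hkv]

-- |set(xs)| = card of toFinset
theorem pvOfListLen {a : Type} [BEq a] [LawfulBEq a] [DecidableEq a] (l : List a) :
    (PySem.Set.ofList l).length = l.toFinset.card := by
  have hnd : (PySem.Set.ofList l).Nodup := PySem.Set.nodup_ofList l
  have hfs : (PySem.Set.ofList l).toFinset = l.toFinset := by
    apply Finset.ext
    intro y
    simp [List.mem_toFinset, PySem.Set.mem_ofList]
  rw [← hfs, List.toFinset_card_of_nodup hnd]

-- distinct vectors inject into the product of the per-dimension value sets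
theorem pvCard (kvs : List (List Int)) (m : Nat) (h : ∀ kv ∈ kvs, kv.length = m) :
    kvs.toFinset.card ≤ ∏ d ∈ Finset.range m, (kvs.map (fun kv => kv.getD d 0)).toFinset.card := by
  rw [Finset.prod_range (fun d => (kvs.map (fun kv => kv.getD d 0)).toFinset.card)]
  rw [← Fintype.card_piFinset]
  apply Finset.card_le_card_of_injOn (fun kv => fun d : Fin m => kv.getD d.val 0)
  · intro kv hkv
    rw [Finset.mem_coe, Fintype.mem_piFinset]
    intro d
    rw [List.mem_toFinset]
    exact List.mem_map.mpr ⟨kv, List.mem_toFinset.mp (Finset.mem_coe.mp hkv), rfl⟩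
  · intro p hp q hq hpq
    have lp := h p (List.mem_toFinset.mp (Finset.mem_coe.mp hp))
    have lq := h q (List.mem_toFinset.mp (Finset.mem_coe.mp hq))
    apply List.ext_getElem (lp.trans lq.symm)
    intro i h1 h2
    have := congrFun hpq ⟨i, lp ▸ h1⟩
    simpa [List.getD_eq_getElem?_getD, List.getElem?_eq_getElem h1,
      List.getElem?_eq_getElem h2] using this

theorem pvFoldl_mul (l : List (Int × Int)) (a : Int) :
    l.foldl (fun acc p => acc * (p.2 - p.1 + 1)) a = a * (l.map (fun p => p.2 - p.1 + 1)).prod := by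
  induction l generalizing a with
  | nil => simp
  | cons p l ih => simp [ih]; ring

-- products of factors ≥ 1 are ≥ 1 / monotone / strictly monotone
theorem pvOne_le_prod : ∀ (l : List Int), (∀ x ∈ l, 1 ≤ x) → 1 ≤ l.prod := by
  intro l
  induction l with
  | nil => intro _; simp
  | cons x l ih =>
      intro h
      have hx := h x (List.mem_cons_self ..)
      have hl := ih (fun y hy => h y (List.mem_cons.mpr (Or.inr hy)))
      simp only [List.prod_cons]
      nlinarith

theorem pvProd_le : ∀ (l : List (Int × Int)), (∀ p ∈ l, 1 ≤ p.1 ∧ p.1 ≤ p.2) →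
    (l.map Prod.fst).prod ≤ (l.map Prod.snd).prod := by
  intro l
  induction l with
  | nil => intro _; simp
  | cons p l ih =>
      intro h
      have hp := h p (List.mem_cons_self ..)
      have htl := fun q hq => h q (List.mem_cons.mpr (Or.inr hq))
      have hl := ih htl
      have h1 : (1:Int) ≤ (l.map Prod.fst).prod :=
        pvOne_le_prod _ (by intro x hx; obtain ⟨q, hq, rfl⟩ := List.mem_map.mp hx; exact (htl q hq).1)
      simp only [List.map_cons, List.prod_cons]
      nlinarith [hp.1, hp.2]

-- strict product comparison over paired factors
theorem pvProd_lt : ∀ (l : List (Int × Int)), (∀ p ∈ l, 1 ≤ p.1 ∧ p.1 ≤ p.2) →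
    (∃ p ∈ l, p.1 < p.2) →
    (l.map Prod.fst).prod < (l.map Prod.snd).prod := by
  intro l
  induction l with
  | nil => intro _ hs; simp at hs
  | cons p l ih =>
      intro h hs
      have hp := h p (List.mem_cons_self ..)
      have htl := fun q hq => h q (List.mem_cons.mpr (Or.inr hq))
      have h1f : (1:Int) ≤ (l.map Prod.fst).prod :=
        pvOne_le_prod _ (by intro x hx; obtain ⟨q, hq, rfl⟩ := List.mem_map.mp hx; exact (htl q hq).1)
      have h1s : (1:Int) ≤ (l.map Prod.snd).prod := by
        apply pvOne_le_prod
        intro x hx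
        obtain ⟨q, hq, rfl⟩ := List.mem_map.mp hx
        exact le_trans (htl q hq).1 (htl q hq).2
      have hle : (l.map Prod.fst).prod ≤ (l.map Prod.snd).prod := pvProd_le l htl
      simp only [List.map_cons, List.prod_cons]
      obtain ⟨q, hq, hqlt⟩ := hs
      rcases List.mem_cons.mp hq with rfl | hq'
      · nlinarith [hp.1]
      · have : (l.map Prod.fst).prod < (l.map Prod.snd).prod := ih htl ⟨q, hq', hqlt⟩
        nlinarith [hp.1, hp.2]

-- per-column facts: 1 ≤ |set(col)| ≤ span, with equality exactly when A's ok-check passes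
theorem pvColFacts (x : Int) (cl : List Int) :
    (1 ≤ ((PySem.Set.ofList (x :: cl)).length : Int)) ∧
    (((PySem.Set.ofList (x :: cl)).length : Int) ≤ cl.foldl max x - cl.foldl min x + 1) ∧
    (pvOkCol (x :: cl) = true ↔
      ((PySem.Set.ofList (x :: cl)).length : Int) = cl.foldl max x - cl.foldl min x + 1) := by
  obtain ⟨t, hvt, hlast⟩ := pvSortedHeadLast x cl
  have hpw : ((cl.foldl min x) :: t).Pairwise (· < ·) := by
    have := PySem.List.sorted_ofList_pairwise_lt (xs := (x :: cl))
    rwa [hvt] at this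
  have hlen : (PySem.Set.ofList (x :: cl)).length = (cl.foldl min x :: t).length := by
    rw [← hvt, PySem.List.length_sorted]
  have hlb := pvLast_lb t _ hpw
  rw [hlast] at hlb
  refine ⟨?_, ?_, ?_⟩
  · rw [hlen]; simp only [List.length_cons]; push_cast; omega
  · rw [hlen]; simp only [List.length_cons]; push_cast; omega
  · unfold pvOkCol
    rw [hvt, pvOk_iff]
    have hch := pvChain_iff t (cl.foldl min x) hpw
    rw [hlast] at hch
    rw [hlen]
    exact hch

-- ===== VERDICT (by name: the statement is the Claim_ definition above) =====
theorem is_cartesian_product_contiguous_py_spec : Claim_equal_is_cartesian_product_contiguous_py := by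
  intro kvs _hdom
  unfold Spec_is_cartesian_product_contiguous_py
  cases kvs with
  | nil => rfl
  | cons kv0 rest =>
    simp only [is_cartesian_product_contiguous_py, is_cartesian_product_contiguous_py_alt]
    by_cases hany : ((kv0 :: rest).any (fun kv => decide (kv.length ≠ kv0.length))) = true
    · rw [if_pos hany]
      obtain ⟨kv, hkv, hne⟩ := List.any_eq_true.mp hany
      have hne' : kv.length ≠ kv0.length := of_decide_eq_true hne
      have hkvr : kv ∈ rest := by
        rcases List.mem_cons.mp hkv with rfl | h
        · exact absurd rfl hne'
        · exact h
      rw [pvB_loop_bad rest kv0.length _ ⟨kv, hkvr, hne'⟩]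
    · rw [if_neg hany]
      have hlenall : ∀ kv ∈ (kv0 :: rest), kv.length = kv0.length := by
        intro kv hkv
        by_contra hne
        exact hany (List.any_eq_true.mpr ⟨kv, hkv, by simpa using hne⟩)
      -- A's columns, with the Int indices turned into Nat ones
      have hcols : (PySem.List.pyRange 0 ((kv0.length : Int)) 1).map
            (fun d => (kv0 :: rest).map (fun kv => PySem.List.pyGetD kv d 0))
          = (List.range kv0.length).map (fun d => (kv0 :: rest).map (fun kv => kv.getD d 0)) := by
        rw [PySem.List.pyRange_zero_natCast, List.map_map]
        apply List.map_congr_left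
        intro d _
        simp only [Function.comp]
        apply List.map_congr_left
        intro kv _
        rw [PySem.List.pyGetD_natCast]
      -- B's bounds as head/last-free running min/max per dimension
      have hbounds : rest.foldl (fun b kv => List.zipWith (fun p v => (min p.1 v, max p.2 v)) b kv)
            (kv0.map (fun v => (v, v)))
          = (List.range kv0.length).map (fun d =>
              ((rest.map (fun kv => kv.getD d 0)).foldl min (kv0.getD d 0),
               (rest.map (fun kv => kv.getD d 0)).foldl max (kv0.getD d 0))) := by
        rw [pvBounds_eq rest _ (by
          intro kv h
          rw [List.length_map]
          exact hlenall kv (List.mem_cons.mpr (Or.inr h)))]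
        rw [List.length_map]
        apply List.map_congr_left
        intro d hd
        have hdlt : d < kv0.length := List.mem_range.mp hd
        have hget : (kv0.map (fun v => (v, v))).getD d (0, 0) = (kv0.getD d 0, kv0.getD d 0) := by
          rw [List.getD_eq_getElem?_getD, List.getElem?_map, List.getD_eq_getElem?_getD,
            List.getElem?_eq_getElem hdlt]
          simp
        rw [hget, pvPairFold]
      rw [pvA_dimLoop_eq_cols, hcols,
        pvB_loop_ok rest kv0.length _ (fun kv h => hlenall kv (List.mem_cons.mpr (Or.inr h))),
        hbounds]
      by_cases hall : ∀ c ∈ (List.range kv0.length).map (fun d => (kv0 :: rest).map (fun kv => kv.getD d 0)),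
          pvOkCol c = true
      · -- every dimension contiguous: A returns head/last of each sorted set = B's (min,max)
        rw [pvA_cols_some _ hall]
        have hmap : ((List.range kv0.length).map (fun d => (kv0 :: rest).map (fun kv => kv.getD d 0))).map
              (fun c => (PySem.List.pyGetD (PySem.List.sorted (PySem.Set.ofList c) (fun x => x) false) 0 0,
                PySem.List.pyGetD (PySem.List.sorted (PySem.Set.ofList c) (fun x => x) false) (-1) 0))
            = (List.range kv0.length).map (fun d =>
                ((rest.map (fun kv => kv.getD d 0)).foldl min (kv0.getD d 0),
                 (rest.map (fun kv => kv.getD d 0)).foldl max (kv0.getD d 0))) := by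
          rw [List.map_map]
          apply List.map_congr_left
          intro d _
          simp only [Function.comp, List.map_cons]
          obtain ⟨t, hvt, hlast⟩ := pvSortedHeadLast (kv0.getD d 0) (rest.map (fun kv => kv.getD d 0))
          rw [hvt]
          rw [PySem.List.pyGetD_zero_cons, PySem.List.pyGetD_neg_one (h := List.cons_ne_nil _ _)]
          rw [hlast]
        rw [hmap]
        by_cases hc : ((List.range kv0.length).map (fun d =>
              ((rest.map (fun kv => kv.getD d 0)).foldl min (kv0.getD d 0),
               (rest.map (fun kv => kv.getD d 0)).foldl max (kv0.getD d 0)))).foldl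
            (fun acc p => acc * (p.2 - p.1 + 1)) 1 = ((PySem.Set.ofList (kv0 :: rest)).length : Int)
        · simp
        · simp
      · -- some dimension is not contiguous: A is None; B's count–volume test must fail too
        push Not at hall
        obtain ⟨c, hcmem, hcbad'⟩ := hall
        have hcbad : pvOkCol c = false := by
          cases h : pvOkCol c
          · rfl
          · exact absurd h hcbad'
        rw [pvA_cols_none _ ⟨c, hcmem, hcbad⟩]
        obtain ⟨d0, hd0mem, hd0col⟩ := List.mem_map.mp hcmem
        -- the counting inequality: |set(kvs)| < ∏ spans
        have hneq : ((List.range kv0.length).map (fun d =>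
              ((rest.map (fun kv => kv.getD d 0)).foldl min (kv0.getD d 0),
               (rest.map (fun kv => kv.getD d 0)).foldl max (kv0.getD d 0)))).foldl
            (fun acc p => acc * (p.2 - p.1 + 1)) 1 ≠ ((PySem.Set.ofList (kv0 :: rest)).length : Int) := by
          rw [pvFoldl_mul, one_mul, List.map_map]
          apply ne_of_gt
          -- count ≤ product of per-dimension distinct counts
          have hcard : (kv0 :: rest).toFinset.card ≤
              ((List.range kv0.length).map (fun d =>
                ((kv0 :: rest).map (fun kv => kv.getD d 0)).toFinset.card)).prod := by
            have h1 := pvCard (kv0 :: rest) kv0.length hlenall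
            exact le_of_le_of_eq h1 rfl
          have hcount : ((PySem.Set.ofList (kv0 :: rest)).length : Int) ≤
              ((List.range kv0.length).map (fun d =>
                ((PySem.Set.ofList ((kv0 :: rest).map (fun kv => kv.getD d 0))).length : Int))).prod := by
            rw [pvOfListLen]
            have hc2 : ((List.range kv0.length).map (fun d =>
                  ((PySem.Set.ofList ((kv0 :: rest).map (fun kv => kv.getD d 0))).length : Int))).prod
                = (((List.range kv0.length).map (fun d =>
                  ((kv0 :: rest).map (fun kv => kv.getD d 0)).toFinset.card)).prod : Int) := by
              rw [Nat.cast_list_prod, List.map_map]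
              apply congrArg
              apply List.map_congr_left
              intro d _
              simp only [Function.comp]
              rw [pvOfListLen]
            rw [hc2]
            exact_mod_cast hcard
          refine lt_of_le_of_lt hcount ?_
          -- strict: per-dimension counts ≤ spans, strictly at the bad dimension
          have hpl := pvProd_lt ((List.range kv0.length).map (fun d =>
              (((PySem.Set.ofList ((kv0 :: rest).map (fun kv => kv.getD d 0))).length : Int),
               (rest.map (fun kv => kv.getD d 0)).foldl max (kv0.getD d 0) -
                 (rest.map (fun kv => kv.getD d 0)).foldl min (kv0.getD d 0) + 1)))
            (by
              intro p hp
              obtain ⟨d, _, rfl⟩ := List.mem_map.mp hp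
              have hf := pvColFacts (kv0.getD d 0) (rest.map (fun kv => kv.getD d 0))
              simp only [List.map_cons] at *
              exact ⟨hf.1, hf.2.1⟩)
            (by
              refine ⟨_, List.mem_map.mpr ⟨d0, hd0mem, rfl⟩, ?_⟩
              have hf := pvColFacts (kv0.getD d0 0) (rest.map (fun kv => kv.getD d0 0))
              have hbad2 : ¬ pvOkCol ((kv0 :: rest).map (fun kv => kv.getD d0 0)) = true := by
                rw [hd0col]
                simp [hcbad]
              simp only [List.map_cons] at hbad2
              have hne2 := fun he => hbad2 (hf.2.2.mpr he)
              simp only []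
              exact lt_of_le_of_ne hf.2.1 hne2)
          rw [List.map_map, List.map_map] at hpl
          simpa only [Function.comp, List.map_cons] using hpl
        simp only [List.getD_eq_getElem?_getD] at hneq
        simp [hneq]
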